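-- pv_equiv track=rewrite | github.com/CipherJon/SynthAIzer | synthaizer/model.py | _get_key_notes
-- ===== SOURCE A (Python) =====
-- from typing import List, Tuple, Optional
--
-- def _get_key_notes(key: str) -> List[int]:
--     """Get the notes in a given key."""
--     # Map of key names to their scale degrees (0-11)
--     key_map = {
--         'C': [0, 2, 4, 5, 7, 9, 11],  # C major
--         'G': [7, 9, 11, 0, 2, 4, 6],  # G major
--         'D': [2, 4, 6, 7, 9, 11, 1],  # D major
--         'A': [9, 11, 1, 2, 4, 6, 8],  # A major
--         'E': [4, 6, 8, 9, 11, 1, 3],  # E major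
--         'B': [11, 1, 3, 4, 6, 8, 10], # B major
--         'F#': [6, 8, 10, 11, 1, 3, 5], # F# major
--         'C#': [1, 3, 5, 6, 8, 10, 0], # C# major
--         'F': [5, 7, 9, 10, 0, 2, 4],  # F major
--         'Bb': [10, 0, 2, 3, 5, 7, 9], # Bb major
--         'Eb': [3, 5, 7, 8, 10, 0, 2], # Eb major
--         'Ab': [8, 10, 0, 1, 3, 5, 7], # Ab major
--         'Db': [1, 3, 5, 6, 8, 10, 0], # Db major
--         'Gb': [6, 8, 10, 11, 1, 3, 5] # Gb major
--     }
--
--     # Convert to uppercase and remove any whitespace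
--     key = key.strip().upper()
--
--     # Get the scale degrees, defaulting to C major if not found
--     scale_degrees = key_map.get(key)
--     if scale_degrees is None:
--         raise ValueError(
--             f"Invalid key: {key}. "
--             f"Expected one of: {', '.join(key_map.keys())}"
--         )
--
--     # Convert scale degrees to MIDI note numbers (C4 = 60)
--     return [degree + 60 for degree in scale_degrees]
-- ===== SOURCE B (Python) =====
-- # B: derive each major scale from the tonic pitch class and the major-scale
-- # interval pattern instead of storing all 14 rows of degrees.
-- _ROOTS = {
--     'C': 0, 'G': 7, 'D': 2, 'A': 9, 'E': 4, 'B': 11, 'F#': 6,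
--     'C#': 1, 'F': 5, 'Bb': 10, 'Eb': 3, 'Ab': 8, 'Db': 1, 'Gb': 6,
-- }
--
-- def _get_key_notes(key: str):
--     """Get the notes in a given key."""
--     key = key.strip().upper()
--     root = _ROOTS.get(key)
--     if root is None:
--         raise ValueError(
--             f"Invalid key: {key}. "
--             f"Expected one of: {', '.join(_ROOTS.keys())}"
--         )
--     return [(root + step) % 12 + 60 for step in (0, 2, 4, 5, 7, 9, 11)]
-- ===== Notes on version B (the rewrite author's own statement) =====
-- stated objective: simpler
-- what changed: Replaces the 14x7 stored table of scale degrees with a dict of tonic pitch classes plus the major-scale interval pattern, computing each degree as (root+step)%12.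
import Mathlib
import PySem

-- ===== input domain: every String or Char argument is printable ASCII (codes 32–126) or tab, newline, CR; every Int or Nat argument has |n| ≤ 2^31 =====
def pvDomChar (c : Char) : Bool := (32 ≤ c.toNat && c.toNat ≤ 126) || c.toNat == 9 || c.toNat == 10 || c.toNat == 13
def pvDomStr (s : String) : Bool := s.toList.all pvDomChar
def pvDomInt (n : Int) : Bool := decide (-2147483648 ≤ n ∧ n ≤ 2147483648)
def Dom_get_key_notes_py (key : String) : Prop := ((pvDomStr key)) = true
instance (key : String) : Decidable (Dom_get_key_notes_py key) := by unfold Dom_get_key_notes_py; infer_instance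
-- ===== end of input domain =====

-- B replaces A's 14x7 stored table of scale degrees by a dict of tonic pitch
-- classes plus the major-scale interval pattern ((root+step)%12); simpler, same cost.

-- ===== PORT A =====
def pvKeyMap : PySem.Dict String (List Int) := PySem.Dict.ofList [
  ("C", [0, 2, 4, 5, 7, 9, 11]),
  ("G", [7, 9, 11, 0, 2, 4, 6]),
  ("D", [2, 4, 6, 7, 9, 11, 1]),
  ("A", [9, 11, 1, 2, 4, 6, 8]),
  ("E", [4, 6, 8, 9, 11, 1, 3]),
  ("B", [11, 1, 3, 4, 6, 8, 10]),
  ("F#", [6, 8, 10, 11, 1, 3, 5]),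
  ("C#", [1, 3, 5, 6, 8, 10, 0]),
  ("F", [5, 7, 9, 10, 0, 2, 4]),
  ("Bb", [10, 0, 2, 3, 5, 7, 9]),
  ("Eb", [3, 5, 7, 8, 10, 0, 2]),
  ("Ab", [8, 10, 0, 1, 3, 5, 7]),
  ("Db", [1, 3, 5, 6, 8, 10, 0]),
  ("Gb", [6, 8, 10, 11, 1, 3, 5])]

def pvScaleOf (k : String) : List Int :=
  match pvKeyMap.get? k with
  | some scale_degrees => scale_degrees.map (fun degree => degree + 60)
  | none => []  -- Python raises ValueError here; excluded by Pre_

def get_key_notes_py (key : String) : List Int :=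
  pvScaleOf (PySem.Str.upper (PySem.Str.strip key))

-- ===== PORT B =====
def pvRoots : PySem.Dict String Int := PySem.Dict.ofList [
  ("C", 0), ("G", 7), ("D", 2), ("A", 9), ("E", 4), ("B", 11), ("F#", 6),
  ("C#", 1), ("F", 5), ("Bb", 10), ("Eb", 3), ("Ab", 8), ("Db", 1), ("Gb", 6)]

def pvScaleOfAlt (k : String) : List Int :=
  match pvRoots.get? k with
  | some root => [0, 2, 4, 5, 7, 9, 11].map (fun step => PySem.Int.mod (root + step) 12 + 60)
  | none => []  -- Python raises ValueError here; excluded by Pre_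

def get_key_notes_py_alt (key : String) : List Int :=
  pvScaleOfAlt (PySem.Str.upper (PySem.Str.strip key))

-- ===== PRECONDITION & SPEC =====
-- Pre_ excludes exactly the keys on which the Python raises ValueError: those whose
-- stripped upper-cased form is not in the table (flat keys like "Bb" become "BB" and raise).
def Pre_get_key_notes_py (key : String) : Prop :=
  PySem.Str.upper (PySem.Str.strip key) ∈ (["C", "G", "D", "A", "E", "B", "F#", "C#", "F"] : List String)
instance (key : String) : Decidable (Pre_get_key_notes_py key) := by unfold Pre_get_key_notes_py; infer_instance

def pvWitness_get_key_notes_py : String := " f# "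

def Spec_get_key_notes_py (key : String) (out : List Int) : Prop := out = get_key_notes_py_alt key
instance (key : String) (out : List Int) : Decidable (Spec_get_key_notes_py key out) := by unfold Spec_get_key_notes_py; infer_instance

-- ===== CLAIM (what is proved, stated in full; the proofs are below) =====
def Claim_equal_get_key_notes_py : Prop := ∀ (key : String), Dom_get_key_notes_py key → Pre_get_key_notes_py key → Spec_get_key_notes_py key (get_key_notes_py key)

-- ===== LEMMAS AND PROOFS =====

-- On every normalized key name the table row of A equals B's computed scale.
set_option maxHeartbeats 1600000 in
theorem pvCore_eq (s : String)
    (hs : s ∈ (["C", "G", "D", "A", "E", "B", "F#", "C#", "F"] : List String)) :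
    pvScaleOf s = pvScaleOfAlt s := by
  fin_cases hs <;> decide

-- ===== VERDICT (by name: the statement is the Claim_ definition above) =====
theorem get_key_notes_py_spec : Claim_equal_get_key_notes_py := by
  intro key _ hpre
  unfold Spec_get_key_notes_py get_key_notes_py get_key_notes_py_alt
  exact pvCore_eq _ hpre
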